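-- pv_equiv track=rewrite | github.com/bnotluvinit/ltcd | Hashes/count_of_consistent_strings_1684.py | solution
-- ===== SOURCE A (Python) =====
-- def solution(allowed, words):
--
--     not_match = 0
--     for word in words:
--         for w in word:
--            if w not in allowed:
--                 not_match +=1
--                 break
--     ans = len(words) - not_match
--     return ans
-- ===== SOURCE B (Python) =====
-- def solution(allowed, words):
--     amask = 0
--     for c in allowed:
--         amask |= 1 << ord(c)
--     count = 0
--     for word in words:
--         wmask = 0
--         for c in word:
--             wmask |= 1 << ord(c)
--         if wmask & amask == wmask:
--             count += 1
--     return count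
-- ===== Notes on version B (the rewrite author's own statement) =====
-- stated objective: alternative
-- what changed: Replaces A's per-character membership scan with early break and final subtraction by bit-parallel set arithmetic: allowed and each word are folded into integer bitmasks keyed by character code, and a word is counted when wmask & amask == wmask.
import Mathlib
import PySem

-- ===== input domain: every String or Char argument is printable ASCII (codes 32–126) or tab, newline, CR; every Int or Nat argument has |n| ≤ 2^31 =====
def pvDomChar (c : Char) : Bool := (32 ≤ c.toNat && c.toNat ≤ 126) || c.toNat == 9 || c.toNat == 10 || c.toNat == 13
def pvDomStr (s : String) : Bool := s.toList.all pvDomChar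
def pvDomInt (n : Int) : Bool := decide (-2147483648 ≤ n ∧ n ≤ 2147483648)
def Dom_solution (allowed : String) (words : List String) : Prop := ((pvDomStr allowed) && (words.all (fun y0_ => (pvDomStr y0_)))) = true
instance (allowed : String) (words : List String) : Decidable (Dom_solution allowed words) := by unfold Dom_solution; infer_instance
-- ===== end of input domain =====

-- B replaces A's per-character membership scan (early break + final subtraction) by bit-parallel set arithmetic: allowed and each word become integer bitmasks keyed by character code, and a word counts when wmask &&& amask = wmask.


-- ===== PORT A =====
-- inner 'for w in word: if w not in allowed: not_match += 1; break'
def solInner (allowed : List Char) : List Char → Int → Int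
  | [], nm => nm
  | w :: rest, nm => if ¬ allowed.contains w then nm + 1 else solInner allowed rest nm

def solution (allowed : String) (words : List String) : Int :=
  let nm := words.foldl (fun nm word => solInner allowed.toList word.toList nm) 0
  (words.length : Int) - nm

-- ===== PORT B =====
-- 'for c in s: m |= 1 << ord(c)'  (Python int bitmask; all values are nonnegative, so Nat is exact)
def maskOf (cs : List Char) : Nat :=
  cs.foldl (fun m c => m ||| 1 <<< c.toNat) 0

def solution_alt (allowed : String) (words : List String) : Int :=
  let amask := maskOf allowed.toList
  words.foldl (fun count word =>
    let wmask := maskOf word.toList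
    if wmask &&& amask == wmask then count + 1 else count) 0

-- ===== PRECONDITION & SPEC =====
def Spec_solution (allowed : String) (words : List String) (out : Int) : Prop := out = solution_alt allowed words
instance (allowed : String) (words : List String) (out : Int) : Decidable (Spec_solution allowed words out) := by unfold Spec_solution; infer_instance

-- ===== CLAIM (what is proved, stated in full; the proofs are below) =====
def Claim_equal_solution : Prop := ∀ (allowed : String) (words : List String), Dom_solution allowed words → Spec_solution allowed words (solution allowed words)

-- ===== LEMMAS AND PROOFS =====

-- the inner loop of A adds 1 exactly when some character of the word is outside allowed
theorem solInner_char (allowed word : List Char) (nm : Int) :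
    solInner allowed word nm = nm + (if ∀ c ∈ word, c ∈ allowed then 0 else 1) := by
  induction word with
  | nil => simp [solInner]
  | cons w rest ih =>
    simp only [solInner]
    by_cases hw : w ∈ allowed
    · rw [if_neg (by simp [hw]), ih]
      simp [hw]
    · rw [if_pos (by simp [hw])]
      rw [if_neg (by simp [hw])]

-- bit n of the folded mask is set iff some character of the list has code n (or it was set already)
theorem testBit_maskFold (cs : List Char) (a : Nat) (n : Nat) :
    (cs.foldl (fun m c => m ||| 1 <<< c.toNat) a).testBit n
      = (a.testBit n || cs.any (fun c => c.toNat == n)) := by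
  induction cs generalizing a with
  | nil => simp
  | cons c rest ih =>
    simp only [List.foldl_cons, List.any_cons]
    rw [ih]
    have : (1 : Nat) <<< c.toNat = 2 ^ c.toNat := by
      rw [Nat.shiftLeft_eq, one_mul]
    rw [this]
    simp only [Nat.testBit_or, Nat.testBit_two_pow]
    by_cases h : c.toNat = n <;> simp [h, Bool.or_comm, Bool.or_left_comm]

theorem testBit_maskOf (cs : List Char) (n : Nat) :
    (maskOf cs).testBit n = cs.any (fun c => c.toNat == n) := by
  rw [maskOf, testBit_maskFold]; simp

-- mask containment characterises bitwise coverage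
theorem and_eq_self_iff (w a : Nat) :
    w &&& a = w ↔ ∀ n, w.testBit n = true → a.testBit n = true := by
  constructor
  · intro h n hn
    have := congrArg (fun x => x.testBit n) h
    simp only [Nat.testBit_and, hn, Bool.true_and] at this
    exact this
  · intro h
    apply Nat.eq_of_testBit_eq
    intro n
    rw [Nat.testBit_and]
    by_cases hw : w.testBit n = true
    · rw [hw, h n hw]; rfl
    · simp [Bool.eq_false_iff.mpr hw]

theorem toNat_inj (c d : Char) (h : c.toNat = d.toNat) : c = d := by
  apply Char.ext
  exact UInt32.toNat_inj.mp h

-- the bitmask test means every character of the word occurs in allowed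
theorem mask_cover (allowed word : List Char) :
    (maskOf word &&& maskOf allowed == maskOf word) = true ↔ ∀ c ∈ word, c ∈ allowed := by
  rw [beq_iff_eq, and_eq_self_iff]
  constructor
  · intro h c hc
    have hb : (maskOf word).testBit c.toNat = true := by
      rw [testBit_maskOf, List.any_eq_true]
      exact ⟨c, hc, by simp⟩
    have := h c.toNat hb
    rw [testBit_maskOf, List.any_eq_true] at this
    obtain ⟨d, hd, hdn⟩ := this
    exact toNat_inj d c (by simpa using hdn) ▸ hd
  · intro h n hn
    rw [testBit_maskOf, List.any_eq_true] at hn ⊢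
    obtain ⟨c, hc, hcn⟩ := hn
    exact ⟨c, h c hc, hcn⟩

theorem main_eq (allowed : List Char) (words : List String) (nm count : Int) :
    count + ((words.length : Int)
        - (words.foldl (fun nm word => solInner allowed word.toList nm) nm - nm))
      = words.foldl (fun count word =>
          if maskOf word.toList &&& maskOf allowed == maskOf word.toList then count + 1 else count) count := by
  induction words generalizing nm count with
  | nil => simp
  | cons w rest ih =>
    simp only [List.foldl_cons, List.length_cons]
    rw [solInner_char]
    by_cases h : ∀ c ∈ w.toList, c ∈ allowed
    · rw [if_pos h, if_pos ((mask_cover allowed w.toList).mpr h)]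
      have h2 := ih (nm + 0) (count + 1)
      push_cast at h2 ⊢
      linarith
    · rw [if_neg h, if_neg (by rw [mask_cover]; exact h)]
      have h2 := ih (nm + 1) count
      push_cast at h2 ⊢
      linarith

-- ===== VERDICT (by name: the statement is the Claim_ definition above) =====
theorem solution_spec : Claim_equal_solution := by
  intro allowed words _
  show _ = _
  unfold solution solution_alt
  simpa using main_eq allowed.toList words 0 0
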